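-- pv_equiv track=rewrite | github.com/KaviMD/stretch-study | test-lz77.py | repeating_length_from_start
-- ===== SOURCE A (Python) =====
-- def repeating_length_from_start(window: str, input_string: str) -> int:
--     """Get the maximum repeating length of the input from the start of the window"""
--     if window == "" or input_string == "":
--         return 0
--
--     if window[0] == input_string[0]:
--         return 1 + repeating_length_from_start(
--             window[1:] + input_string[0], input_string[1:]
--         )
--     else:
--         return 0
-- ===== SOURCE B (Python) =====
-- def repeating_length_from_start(window: str, input_string: str) -> int:
--     """Get the maximum repeating length of the input from the start of the window"""
--     if not window:
--         return 0
--     n = len(window)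
--     L = len(input_string)
--     i = 0
--     # Compare input_string[i] against the original window while i < n, and
--     # against the already-matched input (period n) afterwards: no slicing,
--     # no string rebuilding, single O(L) pass.
--     while i < L and input_string[i] == (window[i] if i < n else input_string[i - n]):
--         i += 1
--     return i
-- ===== Notes on version B (the rewrite author's own statement) =====
-- stated objective: faster
-- what changed: Replaces the recursion that rebuilds the window with window[1:]+c at every step by a single index loop comparing input_string[i] with window[i] (or input_string[i-n] once past the window), doing no slicing or string concatenation.
import Mathlib
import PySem

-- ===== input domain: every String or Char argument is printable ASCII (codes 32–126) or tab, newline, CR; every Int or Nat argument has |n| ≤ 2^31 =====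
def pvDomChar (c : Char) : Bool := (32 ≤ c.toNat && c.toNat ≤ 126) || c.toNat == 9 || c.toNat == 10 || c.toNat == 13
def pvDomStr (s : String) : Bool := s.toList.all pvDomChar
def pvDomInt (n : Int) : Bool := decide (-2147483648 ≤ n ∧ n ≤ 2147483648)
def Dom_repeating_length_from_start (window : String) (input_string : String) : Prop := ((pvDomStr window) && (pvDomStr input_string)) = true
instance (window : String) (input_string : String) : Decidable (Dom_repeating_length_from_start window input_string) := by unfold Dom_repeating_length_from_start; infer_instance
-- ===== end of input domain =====

-- B replaces A's recursion (which rebuilds the window by slicing+concatenation each step)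
-- by one index loop over the input; equivalence of return values is proved below.

-- ===== PORT A =====
-- A on List Char: 'window == "" or input_string == ""' are the [] cases;
-- 'window[0] == input_string[0]' is the head comparison; 'window[1:] + input_string[0]'
-- is w ++ [d]; 'input_string[1:]' is s.
def pvRepA : List Char → List Char → Int
  | [], _ => 0
  | _ :: _, [] => 0
  | c :: w, d :: s => if c = d then 1 + pvRepA (w ++ [d]) s else 0
termination_by _ s => s.length

def repeating_length_from_start (window : String) (input_string : String) : Int :=
  pvRepA window.toList input_string.toList

-- ===== PORT B =====
-- the while loop of Source B; i is the loop variable, returned when the loop stops.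
-- List.getD is exact here: every index used is in range (i < s.length, i < w.length, i - n < i).
def pvRepBLoop (w s : List Char) (i : Nat) : Nat :=
  if i < s.length ∧ s.getD i ' ' = (if i < w.length then w.getD i ' ' else s.getD (i - w.length) ' ')
  then pvRepBLoop w s (i + 1)
  else i
termination_by s.length - i
decreasing_by omega

def repeating_length_from_start_alt (window : String) (input_string : String) : Int :=
  if window.toList = [] then 0
  else (pvRepBLoop window.toList input_string.toList 0 : Int)

-- ===== PRECONDITION & SPEC =====
def Spec_repeating_length_from_start (window : String) (input_string : String) (out : Int) : Prop := out = repeating_length_from_start_alt window input_string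
instance (window : String) (input_string : String) (out : Int) : Decidable (Spec_repeating_length_from_start window input_string out) := by unfold Spec_repeating_length_from_start; infer_instance

-- ===== CLAIM (what is proved, stated in full; the proofs are below) =====
def Claim_equal_repeating_length_from_start : Prop := ∀ (window : String) (input_string : String), Dom_repeating_length_from_start window input_string → Spec_repeating_length_from_start window input_string (repeating_length_from_start window input_string)

-- ===== LEMMAS AND PROOFS =====

lemma pvRepA_nil_right (x : List Char) : pvRepA x [] = 0 := by
  cases x <;> simp [pvRepA]

lemma pvRepA_cons (c d : Char) (w s : List Char) :
    pvRepA (c :: w) (d :: s) = if c = d then 1 + pvRepA (w ++ [d]) s else 0 := by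
  rw [pvRepA]

lemma pvRep_key (w0 s : List Char) (hw : w0 ≠ []) :
    ∀ k i, s.length - i ≤ k → i ≤ s.length →
      pvRepA ((w0 ++ s.take i).drop i) (s.drop i) + (i : Int) = (pvRepBLoop w0 s i : Int) := by
  intro k
  induction k with
  | zero =>
      intro i hk hi
      have hie : i = s.length := by omega
      subst hie
      rw [pvRepBLoop, if_neg (by omega ∘ And.left)]
      simp [pvRepA_nil_right]
  | succ k ih =>
      intro i hk hi
      by_cases hlt : i < s.length
      · have hwlen : 1 ≤ w0.length := List.length_pos_iff.mpr hw
        have hlen : i < (w0 ++ s.take i).length := by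
          rw [List.length_append, List.length_take]; omega
        have hlen1 : i + 1 ≤ (w0 ++ s.take i).length := by
          rw [List.length_append, List.length_take]; omega
        have hhead : (w0 ++ s.take i).getD i ' '
            = (if i < w0.length then w0.getD i ' ' else s.getD (i - w0.length) ' ') := by
          by_cases hi0 : i < w0.length
          · simp [List.getD, List.getElem?_append_left hi0, hi0]
          · have h1 : w0.length ≤ i := by omega
            simp [List.getD_eq_getElem?_getD, List.getElem?_append_right h1, hi0,
              List.getElem?_take]
            rw [if_pos ⟨by omega, by omega⟩]
        have h1 : (w0 ++ s.take i).drop i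
            = (if i < w0.length then w0.getD i ' ' else s.getD (i - w0.length) ' ')
              :: ((w0 ++ s.take i).drop (i+1)) := by
          rw [List.drop_eq_getElem_cons hlen]
          congr 1
          rw [← hhead, List.getD_eq_getElem?_getD, List.getElem?_eq_getElem hlen]
          rfl
        have h2 : s.drop i = s.getD i ' ' :: s.drop (i+1) := by
          rw [List.drop_eq_getElem_cons hlt]
          congr 1
          rw [List.getD_eq_getElem?_getD, List.getElem?_eq_getElem hlt]
          rfl
        have ht : s.take (i+1) = s.take i ++ [s.getD i ' '] := by
          rw [List.getD_eq_getElem?_getD, List.getElem?_eq_getElem hlt]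
          exact List.take_succ_eq_append_getElem hlt
        have hdrop := List.drop_append_of_le_length
          (l₂ := [s.getD i ' ']) hlen1
        have h3 : (w0 ++ s.take i).drop (i+1) ++ [s.getD i ' ']
            = (w0 ++ s.take (i+1)).drop (i+1) := by
          rw [ht, ← List.append_assoc, hdrop]
        by_cases heq : s.getD i ' '
            = (if i < w0.length then w0.getD i ' ' else s.getD (i - w0.length) ' ')
        · rw [pvRepBLoop, if_pos ⟨hlt, heq⟩, h1, h2, pvRepA_cons, if_pos heq.symm, h3]
          have hrec := ih (i+1) (by omega) (by omega)
          push_cast at hrec ⊢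
          linarith [hrec]
        · rw [pvRepBLoop, if_neg (fun h => heq h.2), h1, h2, pvRepA_cons,
            if_neg (fun h => heq h.symm)]
          simp
      · have hie : i = s.length := by omega
        subst hie
        rw [pvRepBLoop, if_neg (by omega ∘ And.left)]
        simp [pvRepA_nil_right]

theorem repeating_length_from_start_spec : Claim_equal_repeating_length_from_start := by
  intro window input_string _
  unfold Spec_repeating_length_from_start repeating_length_from_start repeating_length_from_start_alt
  by_cases hw : window.toList = []
  · rw [if_pos hw, hw]
    simp [pvRepA]
  · rw [if_neg hw]
    have := pvRep_key window.toList input_string.toList hw input_string.toList.length 0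
      (by omega) (by omega)
    simpa using this
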